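-- pv_equiv track=rewrite | github.com/cpwoo/CodeTest | programmers/etc/level3/선입_선출_스케줄링.py | solution
-- ===== SOURCE A (Python) =====
-- def solution(n, cores):
--     answer = 0
--     if n <= len(cores):
--         return n
--
--     n -= len(cores)
--     left, right = 1, max(cores)*n
--     while left+1 < right:
--         mid = (left+right)//2
--         capacity = 0
--         for c in cores:
--             capacity += mid//c
--         if capacity >= n:
--             right = mid
--         else:
--             left = mid
--
--     for c in cores:
--         n -= (right-1)//c
--
--     for i in range(len(cores)):
--         if right%cores[i] == 0:
--             n -= 1
--             if n == 0:
--                 return i+1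
-- ===== SOURCE B (Python) =====
-- def solution(n, cores):
--     m = len(cores)
--     if n <= m:
--         return n
--     r = n - m
--     # exact harmonic sum of rates as a fraction H / L  (L = lcm of the cores)
--     L = 1
--     for c in cores:
--         a, b = L, c
--         while b:
--             a, b = b, a % b
--         L = L // a * c
--     H = 0
--     for c in cores:
--         H += L // c
--     # the critical completion time t (r-th finish) satisfies lo <= t <= hi
--     lo = -((-r * L) // H)
--     hi = -((-(r + m) * L) // H)
--     done_before = 0
--     for c in cores:
--         done_before += (lo - 1) // c
--     # every finish event in [lo, hi], encoded t * m + i so plain sorting is (time, index) order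
--     events = []
--     for i, c in enumerate(cores):
--         for q in range(-((-lo) // c), hi // c + 1):
--             events.append(q * c * m + i)
--     events.sort()
--     return events[r - done_before - 1] % m + 1
-- ===== Notes on version B (the rewrite author's own statement) =====
-- stated objective: alternative
-- what changed: Replaces A's binary search for the critical time plus countdown index scan by a searchless method: exact lcm-based harmonic bounds confine the r-th finish time to a window holding O(len(cores)) finish events, which are enumerated as integers encoding (time, core index), sorted once, and the r-th event is read off directly.
-- outside the precondition, e.g. on solution(4, [1, 1]): A returns None, B returns 2; on solution(5, [1, 1, 2]): A returns None, B returns 2; on solution(5, [0, 2]): A raises ZeroDivisionError, B raises ZeroDivisionError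
import Mathlib
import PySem

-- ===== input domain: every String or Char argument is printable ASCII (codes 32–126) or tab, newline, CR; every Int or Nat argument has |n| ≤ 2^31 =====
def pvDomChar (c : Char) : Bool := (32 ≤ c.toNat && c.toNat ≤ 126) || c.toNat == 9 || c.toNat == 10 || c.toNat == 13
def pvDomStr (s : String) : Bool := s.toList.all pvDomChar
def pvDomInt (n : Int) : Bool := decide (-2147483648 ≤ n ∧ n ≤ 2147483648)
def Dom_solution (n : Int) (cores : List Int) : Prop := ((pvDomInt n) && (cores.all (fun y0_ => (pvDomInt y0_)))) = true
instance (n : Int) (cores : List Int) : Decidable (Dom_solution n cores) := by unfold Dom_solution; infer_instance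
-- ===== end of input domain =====

-- B replaces A's binary search for the critical time (plus countdown index scan) by a
-- searchless method: exact lcm-based harmonic bounds confine the decisive finish time to a
-- window holding O(len cores) finish events, which are enumerated as integers encoding
-- (time, index), sorted once, and read off at rank r (objective: alternative, similar cost).

-- ===== PORT A =====
-- for c in cores: capacity += mid//c
def capA (cores : List Int) (mid : Int) : Int :=
  cores.foldl (fun capacity c => capacity + PySem.Int.floordiv mid c) 0

-- while left+1 < right: ... (returns the final value of `right`)
def loopA (cores : List Int) (n left right : Int) : Int :=
  if _h : left + 1 < right then
    let mid := PySem.Int.floordiv (left + right) 2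
    if capA cores mid ≥ n then loopA cores n left mid
    else loopA cores n mid right
  else right
termination_by (right - left).toNat
decreasing_by
  all_goals
    have hm : PySem.Int.floordiv (left + right) 2 = (left + right) / 2 :=
      PySem.Int.floordiv_eq_ediv_of_pos (by norm_num)
    simp only [mid, hm] at *
    omega

-- for c in cores: n -= (right-1)//c
def subA (cores : List Int) (right n : Int) : Int :=
  cores.foldl (fun n c => n - PySem.Int.floordiv (right - 1) c) n

-- for i in range(len(cores)): if right % cores[i] == 0: n -= 1; if n == 0: return i+1
-- (falling off the loop is Python's implicit `return None`; 0 here, excluded by Pre_)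
def scanA (right : Int) : List Int → Int → Int → Int
  | [], _, _ => 0
  | c :: rest, i, n =>
    if PySem.Int.mod right c = 0 then
      if n - 1 = 0 then i + 1 else scanA right rest (i + 1) (n - 1)
    else scanA right rest (i + 1) n

def solution (n : Int) (cores : List Int) : Int :=
  if n ≤ (cores.length : Int) then n
  else
    let n1 := n - (cores.length : Int)
    -- max(cores): raises ValueError on []; Pre_ excludes that, 0 is a dummy
    let mx := match PySem.List.max? cores (fun x => x) with
      | some m => m
      | none => 0
    let right := loopA cores n1 1 (mx * n1)
    let n2 := subA cores right n1
    scanA right cores 0 n2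

-- ===== PORT B =====
-- while b: a, b = b, a % b   (the hand-written Euclid inside B's lcm loop)
def gcdB (a b : Int) : Int :=
  if _h : b = 0 then a else gcdB b (PySem.Int.mod a b)
termination_by b.natAbs
decreasing_by
  rcases lt_trichotomy b 0 with hb | hb | hb
  · have h1 := PySem.Int.mod_neg_bounds a hb
    omega
  · omega
  · have h1 := PySem.Int.mod_nonneg a hb
    have h2 := PySem.Int.mod_lt a hb
    omega

def solution_alt (n : Int) (cores : List Int) : Int :=
  if n ≤ (cores.length : Int) then n
  else
    let m : Int := (cores.length : Int)
    let r := n - m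
    -- L = lcm of the cores (hand-written gcd), H = sum of L // c: rate sum H/L exactly
    let L := cores.foldl (fun L c => PySem.Int.floordiv L (gcdB L c) * c) 1
    let H := cores.foldl (fun h c => h + PySem.Int.floordiv L c) 0
    let lo := -(PySem.Int.floordiv (-(r * L)) H)
    let hi := -(PySem.Int.floordiv (-((r + m) * L)) H)
    let before := cores.foldl (fun acc c => acc + PySem.Int.floordiv (lo - 1) c) 0
    -- for i, c in enumerate(cores): for q in range(ceil(lo/c), hi//c + 1): append q*c*m + i
    let events := (PySem.List.enumerate cores 0).foldl
      (fun acc p => acc ++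
        (PySem.List.pyRange (-(PySem.Int.floordiv (-lo) p.2)) (PySem.Int.floordiv hi p.2 + 1) 1).map
          (fun q => q * p.2 * m + p.1)) []
    let sortedEv := PySem.List.sorted events (fun e => e) false
    -- events[r - done_before - 1]: IndexError is impossible inside Pre_, 0 is a dummy
    match PySem.List.pyGet? sortedEv (r - before - 1) with
    | some e => PySem.Int.mod e m + 1
    | none => 0

-- ===== PRECONDITION & SPEC =====
-- Pre_ restricts cores to the task's natural domain (a nonempty list of positive processing
-- times; A raises ZeroDivisionError on 0 and its search is meaningless on negatives), and
-- excludes the degenerate region count(1) ≥ n - len (with the one benign exception all-ones,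
-- n = len+1) where A's bisection collapses and A falls off the end returning None (not an int).
def Pre_solution (n : Int) (cores : List Int) : Prop :=
  n ≤ (cores.length : Int) ∨
    ((∀ c ∈ cores, 1 ≤ c) ∧ cores ≠ [] ∧
      (((cores.count 1 : Int) < n - (cores.length : Int)) ∨
        ((∀ c ∈ cores, c = 1) ∧ n = (cores.length : Int) + 1)))
instance (n : Int) (cores : List Int) : Decidable (Pre_solution n cores) := by
  unfold Pre_solution; infer_instance

def pvWitness_solution : Int × List Int := (7, [2, 3])

def Spec_solution (n : Int) (cores : List Int) (out : Int) : Prop := out = solution_alt n cores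
instance (n : Int) (cores : List Int) (out : Int) : Decidable (Spec_solution n cores out) := by
  unfold Spec_solution; infer_instance

-- ===== CLAIM (what is proved, stated in full; the proofs are below) =====
def Claim_equal_solution : Prop := ∀ (n : Int) (cores : List Int),
  Dom_solution n cores → Pre_solution n cores → Spec_solution n cores (solution n cores)

-- ===== LEMMAS AND PROOFS =====

-- proof-side abstraction: capB cores t = sum of t // c (so A's capacity and B's H both reduce to it)
def capB (cores : List Int) (t : Int) : Int :=
  (cores.map (fun c => PySem.Int.floordiv t c)).sum

theorem foldl_add_sum (f : Int → Int) :
    ∀ (l : List Int) (a : Int), l.foldl (fun acc c => acc + f c) a = a + (l.map f).sum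
  | [], a => by simp
  | c :: rest, a => by
    simp only [List.foldl_cons, List.map_cons, List.sum_cons, foldl_add_sum f rest]
    ring

theorem capA_eq_capB (cores : List Int) (t : Int) : capA cores t = capB cores t := by
  simpa [capA, capB] using foldl_add_sum (fun c => PySem.Int.floordiv t c) cores 0

theorem capB_cons (c : Int) (rest : List Int) (t : Int) :
    capB (c :: rest) t = PySem.Int.floordiv t c + capB rest t := by
  simp [capB]

theorem fd_pos (a : Int) {c : Int} (hc : 1 ≤ c) : PySem.Int.floordiv a c = a / c :=
  PySem.Int.floordiv_eq_ediv_of_pos (by omega)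

theorem capB_mono (cores : List Int) (hpos : ∀ c ∈ cores, 1 ≤ c) {a b : Int} (hab : a ≤ b) :
    capB cores a ≤ capB cores b := by
  induction cores with
  | nil => simp [capB]
  | cons c rest ih =>
    have hc : 1 ≤ c := hpos c (by simp)
    rw [capB_cons, capB_cons, fd_pos a hc, fd_pos b hc]
    have h1 : a / c ≤ b / c := Int.ediv_le_ediv (by omega) hab
    have h2 := ih (fun x hx => hpos x (by simp [hx]))
    omega

theorem capB_zero (cores : List Int) (hpos : ∀ c ∈ cores, 1 ≤ c) : capB cores 0 = 0 := by
  induction cores with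
  | nil => simp [capB]
  | cons c rest ih =>
    have hc : 1 ≤ c := hpos c (by simp)
    rw [capB_cons, fd_pos 0 hc, Int.zero_ediv, ih (fun x hx => hpos x (by simp [hx]))]
    ring

theorem capB_one (cores : List Int) (hpos : ∀ c ∈ cores, 1 ≤ c) :
    capB cores 1 = (cores.count 1 : Int) := by
  induction cores with
  | nil => simp [capB]
  | cons c rest ih =>
    have hc : 1 ≤ c := hpos c (by simp)
    have ih' := ih (fun x hx => hpos x (by simp [hx]))
    rw [capB_cons, fd_pos 1 hc, List.count_cons, ih']
    by_cases h1 : c = 1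
    · subst h1; simp; ring
    · have : (1 : Int) / c = 0 := Int.ediv_eq_zero_of_lt (by omega) (by omega)
      have hne : ¬ ((c == 1) = true) := by simpa using h1
      simp [this, hne]

theorem capB_nonneg (cores : List Int) (hpos : ∀ c ∈ cores, 1 ≤ c) {t : Int} (ht : 0 ≤ t) :
    0 ≤ capB cores t := by
  induction cores with
  | nil => simp [capB]
  | cons c rest ih =>
    have hc : 1 ≤ c := hpos c (by simp)
    rw [capB_cons, fd_pos t hc]
    have h1 : 0 ≤ t / c := Int.ediv_nonneg ht (by omega)
    have h2 := ih (fun x hx => hpos x (by simp [hx]))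
    omega

theorem capB_mul_mem (cores : List Int) (hpos : ∀ c ∈ cores, 1 ≤ c) {m r : Int}
    (hm : m ∈ cores) (hr : 0 ≤ r) : r ≤ capB cores (m * r) := by
  have hm1 : 1 ≤ m := hpos m hm
  have hmr : 0 ≤ m * r := mul_nonneg (by omega) hr
  induction cores with
  | nil => simp at hm
  | cons c rest ih =>
    have hc : 1 ≤ c := hpos c (by simp)
    have hrest : ∀ x ∈ rest, 1 ≤ x := fun x hx => hpos x (by simp [hx])
    rw [capB_cons, fd_pos (m * r) hc]
    rcases List.mem_cons.mp hm with h | h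
    · subst h
      have hq : m * r / m = r := by
        rw [Int.mul_ediv_cancel_left r (by omega)]
      have := capB_nonneg rest hrest hmr
      omega
    · have h1 : 0 ≤ m * r / c := Int.ediv_nonneg hmr (by omega)
      have h2 := ih hrest h
      omega

-- one step of capacity: the cores finishing exactly at t
theorem capB_succ (cores : List Int) (hpos : ∀ c ∈ cores, 1 ≤ c) (t : Int) :
    capB cores t = capB cores (t - 1) + (cores.countP (fun c => decide (PySem.Int.mod t c = 0)) : Int) := by
  induction cores with
  | nil => simp [capB]
  | cons c rest ih =>
    have hc : 1 ≤ c := hpos c (by simp)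
    have ih' := ih (fun x hx => hpos x (by simp [hx]))
    have hstep : PySem.Int.floordiv t c =
        PySem.Int.floordiv (t - 1) c + (if PySem.Int.mod t c = 0 then 1 else 0) := by
      rw [fd_pos t hc, fd_pos (t - 1) hc]
      by_cases hd : c ∣ t
      · obtain ⟨m, hmeq⟩ := hd
        have h1 : t / c = m := by rw [hmeq, Int.mul_ediv_cancel_left m (by omega)]
        have h2 : t - 1 = (c - 1) + c * (m - 1) := by rw [hmeq]; ring
        have h3 : (t - 1) / c = (c - 1) / c + (m - 1) := by
          rw [h2, Int.add_mul_ediv_left (c - 1) (m - 1) (by omega)]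
        have h4 : (c - 1) / c = 0 := Int.ediv_eq_zero_of_lt (by omega) (by omega)
        have h5 : PySem.Int.mod t c = 0 := (PySem.Int.mod_eq_zero_iff_dvd t c).mpr ⟨m, hmeq⟩
        simp [h1, h3, h4, h5]
      · have h5 : ¬ PySem.Int.mod t c = 0 := fun h =>
          hd ((PySem.Int.mod_eq_zero_iff_dvd t c).mp h)
        have he : t % c + c * (t / c) = t := Int.emod_add_mul_ediv t c
        have hnn : 0 ≤ t % c := Int.emod_nonneg t (by omega)
        have hlt : t % c < c := Int.emod_lt_of_pos t (by omega)
        have hs0 : t % c ≠ 0 := by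
          intro h0
          exact hd (Int.dvd_of_emod_eq_zero h0)
        have h2 : t - 1 = (t % c - 1) + c * (t / c) := by omega
        have h3 : (t - 1) / c = (t % c - 1) / c + t / c := by
          rw [h2, Int.add_mul_ediv_left (t % c - 1) (t / c) (by omega)]
        have h4 : (t % c - 1) / c = 0 := Int.ediv_eq_zero_of_lt (by omega) (by omega)
        simp [h3, h4, h5]
    rw [capB_cons, capB_cons, List.countP_cons, hstep, ih']
    by_cases hd : PySem.Int.mod t c = 0 <;> simp [hd] <;> push_cast <;> ring

theorem loopA_correct (cores : List Int) (r : Int) :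
    ∀ (d : Nat) (left right : Int), (right - left).toNat ≤ d → left < right →
      capB cores left < r → r ≤ capB cores right →
      capB cores (loopA cores r left right - 1) < r ∧ r ≤ capB cores (loopA cores r left right) := by
  intro d
  induction d with
  | zero => intro left right hd hlt _ _; omega
  | succ d ih =>
    intro left right hd hlt hl hr
    rw [loopA]
    by_cases hc : left + 1 < right
    · have hmid : PySem.Int.floordiv (left + right) 2 = (left + right) / 2 :=
        fd_pos (left + right) (by omega)
      have hb1 : left < PySem.Int.floordiv (left + right) 2 := by rw [hmid]; omega
      have hb2 : PySem.Int.floordiv (left + right) 2 < right := by rw [hmid]; omega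
      rw [dif_pos hc]
      simp only [capA_eq_capB]
      by_cases hcap : capB cores (PySem.Int.floordiv (left + right) 2) ≥ r
      · rw [if_pos hcap]
        exact ih left _ (by omega) hb1 hl hcap
      · rw [if_neg hcap]
        exact ih _ right (by omega) hb2 (by omega) hr
    · rw [dif_neg hc]
      have : right - 1 = left := by omega
      rw [this]
      exact ⟨hl, hr⟩

theorem subA_eq (cores : List Int) (right n : Int) :
    subA cores right n = n - capB cores (right - 1) := by
  suffices h : ∀ (l : List Int) (a : Int),
      l.foldl (fun n c => n - PySem.Int.floordiv (right - 1) c) a =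
        a - (l.map (fun c => PySem.Int.floordiv (right - 1) c)).sum by
    simpa [subA, capB] using h cores n
  intro l
  induction l with
  | nil => simp
  | cons c rest ihl =>
    intro a
    simp only [List.foldl_cons, List.map_cons, List.sum_cons, ihl]
    ring

-- the countdown scan of A picks exactly the (k-1)-indexed element of the finishers at t
theorem scan_eq (t : Int) :
    ∀ (l : List Int) (s k : Int), 1 ≤ k →
      k ≤ (l.countP (fun c => decide (PySem.Int.mod t c = 0)) : Int) →
      PySem.List.pyGet?
        (((PySem.List.enumerate l s).filter (fun p => decide (PySem.Int.mod t p.2 = 0))).map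
          (fun p => p.1 + 1)) (k - 1) = some (scanA t l s k) := by
  intro l
  induction l with
  | nil =>
    intro s k hk1 hk2
    simp at hk2
    omega
  | cons c rest ih =>
    intro s k hk1 hk2
    rw [PySem.List.enumerate_cons, List.countP_cons] at *
    by_cases hd : PySem.Int.mod t c = 0
    · rw [List.filter_cons_of_pos (by simpa using hd), List.map_cons]
      simp only [scanA, if_pos hd]
      by_cases hk : k - 1 = 0
      · rw [hk]
        simp
      · rw [if_neg hk]
        have h0 : (0 : Int) ≤ k - 1 := by omega
        rw [PySem.List.pyGet?_of_nonneg _ h0]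
        have htn : (k - 1).toNat = (k - 1 - 1).toNat + 1 := by omega
        rw [htn, List.getElem?_cons_succ]
        have hrec := ih (s + 1) (k - 1) (by omega) (by simp [hd] at hk2; omega)
        rw [PySem.List.pyGet?_of_nonneg _ (by omega : (0 : Int) ≤ k - 1 - 1)] at hrec
        exact hrec
    · rw [List.filter_cons_of_neg (by simpa using hd)]
      simp only [scanA, if_neg hd]
      exact ih (s + 1) k hk1 (by simp [hd] at hk2; omega)

-- ---- B-side lemmas ----

-- the hand-written Euclid yields a positive common divisor
theorem gcdB_dvd : ∀ (d : Nat) (a b : Int), b.natAbs ≤ d → 1 ≤ a → 0 ≤ b →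
    1 ≤ gcdB a b ∧ gcdB a b ∣ a ∧ gcdB a b ∣ b := by
  intro d
  induction d with
  | zero =>
    intro a b hd ha hb
    have hb0 : b = 0 := by omega
    subst hb0
    rw [gcdB]
    simp [ha]
  | succ d ih =>
    intro a b hd ha hb
    rw [gcdB]
    by_cases hb0 : b = 0
    · simp [hb0, ha]
    · rw [dif_neg hb0]
      have hbpos : 0 < b := by omega
      have hm1 := PySem.Int.mod_nonneg a hbpos
      have hm2 := PySem.Int.mod_lt a hbpos
      obtain ⟨h1, h2, h3⟩ := ih b (PySem.Int.mod a b) (by omega) (by omega) hm1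
      refine ⟨h1, ?_, h2⟩
      have heq := PySem.Int.floordiv_mul_add_mod a b
      have : gcdB b (PySem.Int.mod a b) ∣ PySem.Int.floordiv a b * b :=
        Dvd.dvd.mul_left h2 _
      calc gcdB b (PySem.Int.mod a b) ∣ PySem.Int.floordiv a b * b + PySem.Int.mod a b :=
            dvd_add this h3
        _ = a := heq

-- the lcm fold: positive, and every core divides it
theorem lcmFold_prop (cores : List Int) (hpos : ∀ c ∈ cores, 1 ≤ c) :
    ∀ (L0 : Int), 1 ≤ L0 →
      1 ≤ cores.foldl (fun L c => PySem.Int.floordiv L (gcdB L c) * c) L0 ∧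
      (∀ c ∈ cores, c ∣ cores.foldl (fun L c => PySem.Int.floordiv L (gcdB L c) * c) L0) := by
  induction cores with
  | nil => intro L0 h; simpa using h
  | cons c rest ih =>
    intro L0 hL0
    have hc : 1 ≤ c := hpos c (by simp)
    obtain ⟨hg1, hgL, hgc⟩ := gcdB_dvd c.natAbs L0 c (le_refl _) hL0 (by omega)
    set g := gcdB L0 c with hg
    have hfd : PySem.Int.floordiv L0 g = L0 / g := fd_pos L0 hg1
    have hq1 : 1 ≤ L0 / g := by
      obtain ⟨u, hu⟩ := hgL
      have : L0 / g = u := by rw [hu, Int.mul_ediv_cancel_left u (by omega)]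
      nlinarith [this, hu]
    have hstep : 1 ≤ PySem.Int.floordiv L0 g * c := by
      rw [hfd]; nlinarith
    obtain ⟨h1, h2⟩ := ih (fun x hx => hpos x (by simp [hx]))
      (PySem.Int.floordiv L0 g * c) hstep
    refine ⟨by simpa using h1, ?_⟩
    intro x hx
    rcases List.mem_cons.mp hx with h | h
    · subst h
      -- x ∣ L1 and L1 divides everything later: rest's fold multiplies L1 by integers
      have hx1 : x ∣ PySem.Int.floordiv L0 g * x := dvd_mul_left x _
      -- show the fold over rest is a multiple of its seed
      have hmul : ∀ (l : List Int) (s : Int), (∀ y ∈ l, 1 ≤ y) → 1 ≤ s →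
          s ∣ l.foldl (fun L c => PySem.Int.floordiv L (gcdB L c) * c) s := by
        intro l
        induction l with
        | nil => intro s _ _; simp
        | cons y ys ihy =>
          intro s hys hs
          have hy : 1 ≤ y := hys y (by simp)
          obtain ⟨hg1', hgs', hgy'⟩ := gcdB_dvd y.natAbs s y (le_refl _) hs (by omega)
          set g' := gcdB s y with hg'
          have hfd' : PySem.Int.floordiv s g' = s / g' := fd_pos s hg1'
          have hq1' : 1 ≤ s / g' := by
            obtain ⟨u, hu⟩ := hgs'
            have : s / g' = u := by rw [hu, Int.mul_ediv_cancel_left u (by omega)]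
            nlinarith [this, hu]
          have hseed : s ∣ PySem.Int.floordiv s g' * y := by
            obtain ⟨u, hu⟩ := hgy'
            refine ⟨u, ?_⟩
            rw [hfd', hu]
            have : s / g' * (g' * u) = s / g' * g' * u := by ring
            rw [this, Int.ediv_mul_cancel hgs']
          have hnext : 1 ≤ PySem.Int.floordiv s g' * y := by rw [hfd']; nlinarith
          exact dvd_trans hseed (ihy _ (fun z hz => hys z (by simp [hz])) hnext)
      have := hmul rest (PySem.Int.floordiv L0 g * x)
        (fun z hz => hpos z (by simp [hz])) hstep
      exact dvd_trans hx1 this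
    · exact h2 x h

-- per-core floor bounds scaled to the common denominator L
theorem fd_scaled_bounds {c L : Int} (hc : 1 ≤ c) (hL : 1 ≤ L) (hdvd : c ∣ L) (t : Int) :
    L * (t / c) ≤ t * (L / c) ∧ t * (L / c) - L + L / c ≤ L * (t / c) := by
  have hu : L / c * c = L := Int.ediv_mul_cancel hdvd
  have hu1 : 1 ≤ L / c := by nlinarith [hu]
  have hmod1 := Int.emod_nonneg t (by omega : c ≠ 0)
  have hmod2 := Int.emod_lt_of_pos t (by omega : (0:Int) < c)
  have hdecomp : t % c + c * (t / c) = t := Int.emod_add_mul_ediv t c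
  have h1 : t * (L / c) = t % c * (L / c) + L * (t / c) := by
    calc t * (L / c) = (t % c + c * (t / c)) * (L / c) := by rw [hdecomp]
      _ = t % c * (L / c) + L / c * c * (t / c) := by ring
      _ = t % c * (L / c) + L * (t / c) := by rw [hu]
  have h2 : t % c * (L / c) + L / c ≤ L := by
    have h3 : L / c * (t % c + 1) ≤ L / c * c :=
      mul_le_mul_of_nonneg_left (by omega) (by omega)
    nlinarith [h3, hu]
  constructor
  · nlinarith [h1, mul_nonneg hmod1 (by omega : (0:Int) ≤ L / c)]
  · nlinarith [h1, h2]

-- harmonic bounds: t*H - |cores|*L + H ≤ L*cap(t) ≤ t*H where H = capB cores L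
theorem cap_harmonic (cores : List Int) (L : Int) (hL : 1 ≤ L)
    (hp : ∀ c ∈ cores, 1 ≤ c ∧ c ∣ L) (t : Int) :
    L * capB cores t ≤ t * capB cores L ∧
    t * capB cores L - (cores.length : Int) * L + capB cores L ≤ L * capB cores t := by
  induction cores with
  | nil => simp [capB]
  | cons c rest ih =>
    obtain ⟨hc, hdvd⟩ := hp c (by simp)
    obtain ⟨ih1, ih2⟩ := ih (fun x hx => hp x (by simp [hx]))
    obtain ⟨hb1, hb2⟩ := fd_scaled_bounds hc hL hdvd t
    rw [capB_cons, capB_cons, fd_pos t hc, fd_pos L hc]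
    constructor
    · nlinarith [hb1, ih1]
    · simp only [List.length_cons]
      push_cast
      linarith [hb2, ih2]

-- H = capB cores L is at least the length (each term L//c ≥ 1)
theorem hSum_ge_len (cores : List Int) (L : Int) (hL : 1 ≤ L)
    (hp : ∀ c ∈ cores, 1 ≤ c ∧ c ∣ L) :
    (cores.length : Int) ≤ capB cores L := by
  induction cores with
  | nil => simp [capB]
  | cons c rest ih =>
    obtain ⟨hc, hdvd⟩ := hp c (by simp)
    have hu : L / c * c = L := Int.ediv_mul_cancel hdvd
    have hu1 : 1 ≤ L / c := by nlinarith [hu]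
    have := ih (fun x hx => hp x (by simp [hx]))
    rw [capB_cons, fd_pos L hc]
    simp only [List.length_cons]
    push_cast
    omega

-- the filtered enumerate has the countP length
theorem filter_enum_len {α : Type} (pred : α → Bool) :
    ∀ (l : List α) (s : Int),
      (((PySem.List.enumerate l s).filter (fun p => pred p.2)).length : Int) =
        (l.countP pred : Int) := by
  intro l
  induction l with
  | nil => intro s; simp [PySem.List.enumerate_nil]
  | cons c rest ih =>
    intro s
    rw [PySem.List.enumerate_cons, List.countP_cons]
    by_cases hp : pred c = true
    · rw [List.filter_cons_of_pos (by simpa using hp)]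
      simp only [List.length_cons, hp]
      push_cast
      have := ih (s + 1)
      omega
    · rw [List.filter_cons_of_neg (by simpa using hp)]
      simp only [hp]
      have := ih (s + 1)
      push_cast at *
      omega


-- ---- the canonical event list (proof-side) ----

-- finish events of core index k (value c) in [lo, hi], encoded q*c*m + k
def evOf (m lo hi : Int) (p : Int × Int) : List Int :=
  (PySem.List.pyRange (-(PySem.Int.floordiv (-lo) p.2)) (PySem.Int.floordiv hi p.2 + 1) 1).map
    (fun q => q * p.2 * m + p.1)

-- events at time t, in index order, encoded t*m + k
def blockAt (cores : List Int) (m t : Int) : List Int :=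
  ((PySem.List.enumerate cores 0).filter (fun p => decide (PySem.Int.mod t p.2 = 0))).map
    (fun p => t * m + p.1)

def canon (cores : List Int) (m lo hi : Int) : List Int :=
  (PySem.List.pyRange lo (hi + 1) 1).flatMap (fun t => blockAt cores m t)

theorem decode_eq {a b i j m : Int} (hm : 1 ≤ m) (hi0 : 0 ≤ i) (hi1 : i < m)
    (hj0 : 0 ≤ j) (hj1 : j < m) (h : a * m + i = b * m + j) : a = b ∧ i = j := by
  rcases lt_trichotomy a b with hab | hab | hab
  · nlinarith [mul_le_mul_of_nonneg_right (by omega : a + 1 ≤ b) (by omega : (0:Int) ≤ m)]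
  · constructor
    · exact hab
    · subst hab; omega
  · nlinarith [mul_le_mul_of_nonneg_right (by omega : b + 1 ≤ a) (by omega : (0:Int) ≤ m)]

theorem mem_enum_bounds {cores : List Int} {p : Int × Int}
    (h : p ∈ PySem.List.enumerate cores 0) :
    0 ≤ p.1 ∧ p.1 < (cores.length : Int) ∧ p.2 ∈ cores := by
  obtain ⟨k, hk, hp⟩ := (PySem.List.mem_enumerate_iff cores 0 p).mp h
  subst hp
  refine ⟨by omega, by push_cast; omega, List.getElem_mem hk⟩

-- membership in one core's event list
theorem mem_evOf {m lo hi : Int} {p : Int × Int} {e : Int} (hc : 1 ≤ p.2) :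
    e ∈ evOf m lo hi p ↔ ∃ t, lo ≤ t ∧ t ≤ hi ∧ p.2 ∣ t ∧ e = t * m + p.1 := by
  unfold evOf
  rw [List.mem_map]
  constructor
  · rintro ⟨q, hq, rfl⟩
    rw [PySem.List.mem_pyRange_one] at hq
    rw [fd_pos (-lo) hc, fd_pos hi hc] at hq
    obtain ⟨h1, h2⟩ := hq
    refine ⟨q * p.2, ?_, ?_, Dvd.intro_left q rfl, by ring⟩
    · have h3 : -q ≤ -lo / p.2 := by omega
      have h4 := (Int.le_ediv_iff_mul_le (by omega : (0:Int) < p.2)).mp h3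
      rw [neg_mul] at h4
      omega
    · have h3 : q ≤ hi / p.2 := by omega
      exact (Int.le_ediv_iff_mul_le (by omega : (0:Int) < p.2)).mp h3
  · rintro ⟨t, h1, h2, ⟨q, rfl⟩, rfl⟩
    refine ⟨q, ?_, by ring_nf⟩
    rw [PySem.List.mem_pyRange_one, fd_pos (-lo) hc, fd_pos hi hc]
    constructor
    · have hq1 : -q * p.2 ≤ -lo := by rw [neg_mul, mul_comm]; omega
      have := (Int.le_ediv_iff_mul_le (by omega : (0:Int) < p.2)).mpr hq1
      omega
    · have hq2 : q * p.2 ≤ hi := by rw [mul_comm]; omega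
      have := (Int.le_ediv_iff_mul_le (by omega : (0:Int) < p.2)).mpr hq2
      omega

theorem mem_blockAt {cores : List Int} {m t e : Int} :
    e ∈ blockAt cores m t ↔ ∃ p ∈ PySem.List.enumerate cores 0,
      PySem.Int.mod t p.2 = 0 ∧ e = t * m + p.1 := by
  unfold blockAt
  rw [List.mem_map]
  constructor
  · rintro ⟨p, hp, rfl⟩
    rw [List.mem_filter] at hp
    exact ⟨p, hp.1, by simpa using hp.2, rfl⟩
  · rintro ⟨p, hp, hd, rfl⟩
    exact ⟨p, List.mem_filter.mpr ⟨hp, by simpa using hd⟩, rfl⟩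

theorem mem_canon {cores : List Int} {m lo hi e : Int} :
    e ∈ canon cores m lo hi ↔ ∃ t, lo ≤ t ∧ t ≤ hi ∧
      ∃ p ∈ PySem.List.enumerate cores 0, PySem.Int.mod t p.2 = 0 ∧ e = t * m + p.1 := by
  unfold canon
  rw [List.mem_flatMap]
  constructor
  · rintro ⟨t, ht, he⟩
    rw [PySem.List.mem_pyRange_one] at ht
    exact ⟨t, ht.1, by omega, mem_blockAt.mp he⟩
  · rintro ⟨t, h1, h2, hrest⟩
    exact ⟨t, PySem.List.mem_pyRange_one.mpr ⟨h1, by omega⟩, mem_blockAt.mpr hrest⟩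

theorem canon_pairwise_lt (cores : List Int) (m lo hi : Int)
    (hm : m = (cores.length : Int)) :
    (canon cores m lo hi).Pairwise (· < ·) := by
  unfold canon
  rw [List.pairwise_flatMap]
  constructor
  · intro t _
    unfold blockAt
    refine List.Pairwise.map _ ?_
      (List.Pairwise.sublist List.filter_sublist (PySem.List.pairwise_lt_enumerate cores 0))
    intro p q hpq
    omega
  · refine (PySem.List.pairwise_lt_pyRange_one lo (hi + 1)).imp ?_
    intro t t' htt x hx y hy
    obtain ⟨p, hp, _, rfl⟩ := mem_blockAt.mp hx
    obtain ⟨q, hq, _, rfl⟩ := mem_blockAt.mp hy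
    obtain ⟨hp0, hp1, _⟩ := mem_enum_bounds hp
    obtain ⟨hq0, hq1, _⟩ := mem_enum_bounds hq
    rw [← hm] at hp1 hq1
    nlinarith [mul_le_mul_of_nonneg_right (by omega : t + 1 ≤ t') (by omega : (0:Int) ≤ m)]

theorem canon_perm_events (cores : List Int) (hpos : ∀ c ∈ cores, 1 ≤ c)
    (m lo hi : Int) (hm : m = (cores.length : Int)) (hm1 : 1 ≤ m) :
    (canon cores m lo hi).Perm
      ((PySem.List.enumerate cores 0).flatMap (fun p => evOf m lo hi p)) := by
  have hb : ∀ p ∈ PySem.List.enumerate cores 0, 0 ≤ p.1 ∧ p.1 < m ∧ 1 ≤ p.2 := by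
    intro p hp
    obtain ⟨h1, h2, h3⟩ := mem_enum_bounds hp
    exact ⟨h1, by omega, hpos p.2 h3⟩
  have hnodupE : ((PySem.List.enumerate cores 0).flatMap (fun p => evOf m lo hi p)).Nodup := by
    rw [List.nodup_flatMap]
    constructor
    · intro p hp
      obtain ⟨_, _, hc⟩ := hb p hp
      unfold evOf
      refine List.Nodup.map ?_ (PySem.List.nodup_pyRange_one _ _)
      intro q1 q2 hq
      have hcm : 1 ≤ p.2 * m := by nlinarith
      have hq' : q1 * p.2 * m + p.1 = q2 * p.2 * m + p.1 := hq
      have h : q1 * (p.2 * m) = q2 * (p.2 * m) := by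
        rw [← mul_assoc, ← mul_assoc]
        omega
      exact mul_right_cancel₀ (by omega : p.2 * m ≠ 0) h
    · refine List.Pairwise.imp_of_mem ?_ (PySem.List.pairwise_lt_enumerate cores 0)
      intro p q hp hq hlt
      obtain ⟨hp0, hp1, hpc⟩ := hb p hp
      obtain ⟨hq0, hq1, hqc⟩ := hb q hq
      intro e hep heq
      obtain ⟨t, _, _, _, rfl⟩ := (mem_evOf hpc).mp hep
      obtain ⟨t', _, _, _, he⟩ := (mem_evOf hqc).mp heq
      obtain ⟨-, hij⟩ := decode_eq hm1 hp0 hp1 hq0 hq1 he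
      omega
  have hnodupC : (canon cores m lo hi).Nodup :=
    (canon_pairwise_lt cores m lo hi hm).imp (fun h => by
      intro he; rw [he] at h; exact lt_irrefl _ h)
  rw [List.perm_ext_iff_of_nodup hnodupC hnodupE]
  intro e
  rw [mem_canon, List.mem_flatMap]
  constructor
  · rintro ⟨t, h1, h2, p, hp, hd, rfl⟩
    obtain ⟨_, _, hc⟩ := hb p hp
    exact ⟨p, hp, (mem_evOf hc).mpr
      ⟨t, h1, h2, (PySem.Int.mod_eq_zero_iff_dvd t p.2).mp hd, rfl⟩⟩
  · rintro ⟨p, hp, he⟩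
    obtain ⟨_, _, hc⟩ := hb p hp
    obtain ⟨t, h1, h2, hd, rfl⟩ := (mem_evOf hc).mp he
    exact ⟨t, h1, h2, p, hp, (PySem.Int.mod_eq_zero_iff_dvd t p.2).mpr hd, rfl⟩

theorem blockAt_len (cores : List Int) (m t : Int) :
    ((blockAt cores m t).length : Int) =
      (cores.countP (fun c => decide (PySem.Int.mod t c = 0)) : Int) := by
  unfold blockAt
  rw [List.length_map]
  exact filter_enum_len (fun c => decide (PySem.Int.mod t c = 0)) cores 0

theorem prefix_len (cores : List Int) (hpos : ∀ c ∈ cores, 1 ≤ c) (m : Int) :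
    ∀ (d : Nat) (a : Int),
      (((PySem.List.pyRange a (a + d) 1).flatMap (fun t => blockAt cores m t)).length : Int) =
        capB cores (a + d - 1) - capB cores (a - 1) := by
  intro d
  induction d with
  | zero =>
    intro a
    rw [show a + (0:Nat) = a by push_cast; ring, PySem.List.pyRange_one_eq_nil (le_refl a)]
    simp
  | succ d ih =>
    intro a
    have hstep : a + ((d:Nat)+1:Nat) = (a + d) + 1 := by push_cast; ring
    rw [hstep, PySem.List.pyRange_one_succ_right (by omega : a ≤ a + d),
      List.flatMap_append, List.length_append]
    have hcs := capB_succ cores hpos (a + d)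
    have hb := blockAt_len cores m (a + d)
    have hih := ih a
    push_cast at *
    rw [show a + (d:Int) + 1 - 1 = a + (d:Int) by ring]
    simp only [List.flatMap_cons, List.flatMap_nil, List.append_nil] at *
    omega

-- ===== VERDICT (by name: the statement is the Claim_ definition above) =====
theorem solution_spec : Claim_equal_solution := by
  intro n cores hDom hPre
  unfold Spec_solution
  by_cases hn : n ≤ (cores.length : Int)
  · simp [solution, solution_alt, if_pos hn]
  · rcases hPre with h | ⟨hpos, hne, hcase⟩
    · exact absurd h hn
    clear hDom
    have hlen1 : 1 ≤ (cores.length : Int) := by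
      have := List.length_pos_iff.mpr hne
      omega
    have hcnt0 : (0 : Int) ≤ (cores.count 1 : Int) := by positivity
    set m : Int := (cores.length : Int) with hm_def
    set r := n - m with hr_def
    have hr1 : 1 ≤ r := by
      rcases hcase with h | ⟨_, h⟩ <;> omega
    obtain ⟨mx, hmx⟩ : ∃ v, PySem.List.max? cores (fun x => x) = some v := by
      cases h : PySem.List.max? cores (fun x => x) with
      | none => exact absurd ((PySem.List.max?_eq_none_iff cores _).mp h) hne
      | some v => exact ⟨v, rfl⟩
    have hmx_mem : mx ∈ cores := PySem.List.max?_mem hmx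
    have hmx_max : ∀ y ∈ cores, y ≤ mx := PySem.List.max?_isMax hmx
    have hmx1 : 1 ≤ mx := hpos mx hmx_mem
    have hcapmr : r ≤ capB cores (mx * r) := capB_mul_mem cores hpos hmx_mem (by omega)
    -- A's loop brackets the critical time t
    have htA : capB cores (loopA cores r 1 (mx * r) - 1) < r ∧
        r ≤ capB cores (loopA cores r 1 (mx * r)) := by
      rcases hcase with hcnt | ⟨hones, hn1⟩
      · have hmr2 : 2 ≤ mx * r := by
          by_contra hlt
          push_neg at hlt
          have hge1 : 1 * 1 ≤ mx * r := mul_le_mul hmx1 hr1 (by omega) (by omega)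
          have hm2 : mx < 2 := by
            by_contra hm2
            push_neg at hm2
            have : 2 * 1 ≤ mx * r := mul_le_mul hm2 hr1 (by omega) (by omega)
            omega
          have hrr2 : r < 2 := by
            by_contra hr2
            push_neg at hr2
            have : 1 * 2 ≤ mx * r := mul_le_mul hmx1 hr2 (by omega) (by omega)
            omega
          have hall : ∀ c ∈ cores, c = 1 := fun c hc =>
            le_antisymm (le_trans (hmx_max c hc) (by omega)) (hpos c hc)
          have hclen : cores.count 1 = cores.length :=
            List.count_eq_length.mpr (fun b hb => (hall b hb).symm)
          omega
        have hcap1 : capB cores 1 < r := by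
          rw [capB_one cores hpos]
          omega
        exact loopA_correct cores r (mx * r - 1).toNat 1 (mx * r) (by omega) (by omega)
          hcap1 hcapmr
      · have hm_eq : mx = 1 := hones mx hmx_mem
        have hr_eq : r = 1 := by omega
        have hmr1 : mx * r = 1 := by rw [hm_eq, hr_eq]; ring
        rw [hmr1, loopA, dif_neg (by omega : ¬ (1 : Int) + 1 < 1)]
        constructor
        · rw [show (1 : Int) - 1 = 0 by ring, capB_zero cores hpos]
          omega
        · rw [capB_one cores hpos, hr_eq]
          have hclen : cores.count 1 = cores.length :=
            List.count_eq_length.mpr (fun b hb => (hones b hb).symm)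
          omega
    set t := loopA cores r 1 (mx * r) with ht_def
    set k := r - capB cores (t - 1) with hk_def
    have hk1 : 1 ≤ k := by omega
    have hkcnt : k ≤ (cores.countP (fun c => decide (PySem.Int.mod t c = 0)) : Int) := by
      have := capB_succ cores hpos t
      omega
    have hA : solution n cores = scanA t cores 0 k := by
      rw [solution, if_neg hn]
      simp only [hmx]
      rw [← hr_def, ← ht_def, subA_eq, ← hk_def]
    -- B's harmonic window
    set L := cores.foldl (fun L c => PySem.Int.floordiv L (gcdB L c) * c) 1 with hL_def
    obtain ⟨hL1, hLdvd⟩ := lcmFold_prop cores hpos 1 (le_refl 1)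
    rw [← hL_def] at hL1 hLdvd
    have hp : ∀ c ∈ cores, 1 ≤ c ∧ c ∣ L := fun c hc => ⟨hpos c hc, hLdvd c hc⟩
    have hHfold : cores.foldl (fun h c => h + PySem.Int.floordiv L c) 0 = capB cores L := by
      simpa [capB] using foldl_add_sum (fun c => PySem.Int.floordiv L c) cores 0
    set H := capB cores L with hH_def
    have hH1 : m ≤ H := by
      rw [hH_def, hm_def]
      exact hSum_ge_len cores L hL1 hp
    have hH0 : (0 : Int) < H := by omega
    set lo := -(PySem.Int.floordiv (-(r * L)) H) with hlo_def
    set hi := -(PySem.Int.floordiv (-((r + m) * L)) H) with hhi_def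
    have hfdlo : PySem.Int.floordiv (-(r * L)) H = -(r * L) / H := fd_pos _ (by omega)
    have hfdhi : PySem.Int.floordiv (-((r + m) * L)) H = -((r + m) * L) / H :=
      fd_pos _ (by omega)
    have hub_t := (cap_harmonic cores L hL1 hp t).1
    have hlb_t1 := (cap_harmonic cores L hL1 hp (t - 1)).2
    rw [← hH_def] at hub_t hlb_t1
    rw [← hm_def] at hlb_t1
    have hlo_le : lo ≤ t := by
      have h1 : r * L ≤ t * H := by
        have h2 : r * L ≤ capB cores t * L :=
          mul_le_mul_of_nonneg_right (by omega) (by omega)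
        have h3 : capB cores t * L = L * capB cores t := mul_comm _ _
        linarith
      have h4 : -t * H ≤ -(r * L) := by rw [neg_mul]; omega
      have h5 := (Int.le_ediv_iff_mul_le hH0).mpr h4
      rw [hlo_def, hfdlo]
      omega
    have hhi_ge : t ≤ hi := by
      have h2 : L * capB cores (t - 1) ≤ L * (r - 1) :=
        mul_le_mul_of_nonneg_left (by omega) (by omega)
      have h3 : t * H < (r + m) * L + H := by nlinarith [hlb_t1, h2]
      have h4 : -((r + m) * L) < -t * H + H := by rw [neg_mul]; omega
      have h5 := (Int.ediv_le_iff_le_mul hH0).mpr h4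
      rw [hhi_def, hfdhi]
      omega
    set before := capB cores (lo - 1) with hbefore_def
    have hbefold : cores.foldl (fun acc c => acc + PySem.Int.floordiv (lo - 1) c) 0 = before := by
      rw [hbefore_def]
      simpa [capB] using foldl_add_sum (fun c => PySem.Int.floordiv (lo - 1) c) cores 0
    have hΔ : before ≤ capB cores (t - 1) :=
      hbefore_def ▸ capB_mono cores hpos (by omega)
    have hbe0 : 0 ≤ before := hbefore_def ▸ capB_nonneg cores hpos ?hlo0
    case hlo0 =>
      -- lo - 1 ≥ 0: lo = ceil(r*L/H) ≥ 1 since r*L ≥ 1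
      have h1 : -(r * L) / H ≤ -1 := by
        have h2 : -(r * L) / H < 0 := Int.ediv_neg_of_neg_of_pos (by nlinarith) hH0
        omega
      rw [hlo_def, hfdlo]
      omega
    -- the sorted event list is the canonical one
    have hm1 : (1 : Int) ≤ m := hlen1
    -- decompose the canonical list around t
    have hsplit : canon cores m lo hi =
        ((PySem.List.pyRange lo t 1).flatMap (fun u => blockAt cores m u)) ++
          (blockAt cores m t ++
            ((PySem.List.pyRange (t + 1) (hi + 1) 1).flatMap (fun u => blockAt cores m u))) := by
      unfold canon
      rw [PySem.List.pyRange_one_append lo t (hi + 1) hlo_le (by omega),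
        PySem.List.pyRange_one_cons (by omega : t < hi + 1),
        List.flatMap_append, List.flatMap_cons]
    have hPlen : ((((PySem.List.pyRange lo t 1).flatMap
        (fun u => blockAt cores m u)).length : Int)) = capB cores (t - 1) - before := by
      have h1 := prefix_len cores hpos m (t - lo).toNat lo
      rw [show lo + (((t - lo).toNat : Nat) : Int) = t by omega] at h1
      rw [h1, hbefore_def]
    have hblen : ((blockAt cores m t).length : Int) =
        (cores.countP (fun c => decide (PySem.Int.mod t c = 0)) : Int) :=
      blockAt_len cores m t
    -- the element at the target index
    obtain ⟨p, hpget, hpscan⟩ : ∃ p,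
        (((PySem.List.enumerate cores 0).filter
          (fun p => decide (PySem.Int.mod t p.2 = 0))))[(k - 1).toNat]? = some p ∧
        p.1 + 1 = scanA t cores 0 k := by
      have hse := scan_eq t cores 0 k hk1 hkcnt
      rw [PySem.List.pyGet?_of_nonneg _ (by omega : (0:Int) ≤ k - 1), List.getElem?_map] at hse
      cases hf : (((PySem.List.enumerate cores 0).filter
          (fun p => decide (PySem.Int.mod t p.2 = 0))))[(k - 1).toNat]? with
      | none => rw [hf] at hse; simp at hse
      | some p =>
        rw [hf] at hse
        simp only [Option.map_some, Option.some_inj] at hse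
        exact ⟨p, rfl, hse⟩
    have hpmem : p ∈ PySem.List.enumerate cores 0 :=
      (List.mem_filter.mp (List.mem_of_getElem? hpget)).1
    obtain ⟨hp0, hp1, -⟩ := mem_enum_bounds hpmem
    rw [← hm_def] at hp1
    have hget : PySem.List.pyGet? (canon cores m lo hi) (r - before - 1) =
        some (t * m + p.1) := by
      rw [PySem.List.pyGet?_of_nonneg _ (by omega : (0:Int) ≤ r - before - 1), hsplit]
      rw [List.getElem?_append_right (by omega)]
      rw [show (r - before - 1).toNat -
          ((PySem.List.pyRange lo t 1).flatMap (fun u => blockAt cores m u)).length =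
          (k - 1).toNat by omega]
      rw [List.getElem?_append_left (by omega)]
      unfold blockAt
      rw [List.getElem?_map, hpget]
      rfl
    have hgev : ∀ p : Int × Int,
        (PySem.List.pyRange (-(PySem.Int.floordiv (-lo) p.2))
          (PySem.Int.floordiv hi p.2 + 1) 1).map (fun q => q * p.2 * m + p.1) =
        evOf m lo hi p := fun _ => rfl
    have hsorted : PySem.List.sorted
        ((PySem.List.enumerate cores 0).flatMap (fun p => evOf m lo hi p)) (fun e => e) false =
        canon cores m lo hi :=
      PySem.List.sorted_eq_of_perm_of_pairwise_lt _ _ _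
        (canon_perm_events cores hpos m lo hi hm_def hm1)
        (canon_pairwise_lt cores m lo hi hm_def)
    have hmod : PySem.Int.mod (t * m + p.1) m = p.1 := by
      rw [PySem.Int.mod_eq_emod_of_pos (by omega : (0:Int) < m),
        show t * m + p.1 = p.1 + m * t by ring,
        Int.add_mul_emod_self_left, Int.emod_eq_of_lt hp0 hp1]
    have hB : solution_alt n cores = scanA t cores 0 k := by
      rw [solution_alt, if_neg hn]
      simp only [← hm_def, ← hr_def, ← hL_def, hHfold, ← hlo_def, ← hhi_def,
        hbefold, hgev]
      rw [PySem.List.foldl_append_eq_flatMap (fun p => evOf m lo hi p)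
        (PySem.List.enumerate cores 0) [], List.nil_append, hsorted, hget]
      show PySem.Int.mod (t * m + p.1) m + 1 = scanA t cores 0 k
      rw [hmod]
      exact hpscan
    rw [hA, hB]
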